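-- pv_equiv track=rewrite | github.com/wormtql/yas-train | mona/nn/model.py | arr_to_string
-- ===== SOURCE A (Python) =====
-- def arr_to_string(arr):
--     temp = ""
--     last_word = "-"
--     for word in arr:
--         if word != last_word and word != "-":
--             temp += word
--         last_word = word
--     return temp
-- ===== SOURCE B (Python) =====
-- def arr_to_string(arr):
--     out = []
--     i = 0
--     n = len(arr)
--     while i < n:
--         w = arr[i]
--         j = i + 1
--         while j < n and arr[j] == w:
--             j += 1
--         if w != "-":
--             out.append(w)
--         i = j
--     return "".join(out)
-- ===== Notes on version B (the rewrite author's own statement) =====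
-- stated objective: alternative
-- what changed: B scans the list run by run (two-index run detection, then a single join), instead of A's element-wise scan carrying a last_word sentinel and repeated string concatenation.
import Mathlib
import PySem

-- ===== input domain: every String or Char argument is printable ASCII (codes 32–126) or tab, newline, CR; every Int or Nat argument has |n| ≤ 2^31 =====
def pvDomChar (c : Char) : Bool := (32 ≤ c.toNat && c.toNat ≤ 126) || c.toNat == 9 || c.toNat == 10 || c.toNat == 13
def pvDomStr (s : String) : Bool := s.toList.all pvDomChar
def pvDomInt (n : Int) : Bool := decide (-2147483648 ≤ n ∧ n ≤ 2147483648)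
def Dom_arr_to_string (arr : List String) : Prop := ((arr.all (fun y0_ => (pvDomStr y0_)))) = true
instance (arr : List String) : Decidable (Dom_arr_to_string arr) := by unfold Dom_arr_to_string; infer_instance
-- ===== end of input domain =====

-- ===== PORT A =====
-- B re-implements the CTC collapse by run-scanning + single join instead of A's last_word scan (objective: alternative).
def pvStepA (st : String × String) (word : String) : String × String :=
  (if word != st.2 && word != "-" then st.1 ++ word else st.1, word)

def arr_to_string (arr : List String) : String :=
  (arr.foldl pvStepA ("", "-")).1

-- ===== PORT B =====
-- pvRuns mirrors Source B's outer while loop: take the run leader, skip the rest of the run (inner while = dropWhile), keep it unless "-".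
def pvRuns : List String → List String
  | [] => []
  | w :: rest =>
      if w != "-" then w :: pvRuns (rest.dropWhile (· == w)) else pvRuns (rest.dropWhile (· == w))
termination_by l => l.length
decreasing_by
  all_goals simp only [List.length_cons]
  all_goals have := List.length_dropWhile_le (· == w) rest
  all_goals omega

def arr_to_string_alt (arr : List String) : String := PySem.Str.join "" (pvRuns arr)

-- ===== PRECONDITION & SPEC =====
def Spec_arr_to_string (arr : List String) (out : String) : Prop := out = arr_to_string_alt arr
instance (arr : List String) (out : String) : Decidable (Spec_arr_to_string arr out) := by unfold Spec_arr_to_string; infer_instance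

-- ===== CLAIM (what is proved, stated in full; the proofs are below) =====
def Claim_equal_arr_to_string : Prop := ∀ (arr : List String), Dom_arr_to_string arr → Spec_arr_to_string arr (arr_to_string arr)

-- ===== LEMMAS AND PROOFS =====

def pvG (arr : List String) (last : String) : String := (arr.foldl pvStepA ("", last)).1

theorem pv_join_cons (w : String) (l : List String) :
    PySem.Str.join "" (w :: l) = w ++ PySem.Str.join "" l := by
  cases l with
  | nil =>
      simp [PySem.Str.join, PySem.Chars.join_nil, PySem.Chars.join_singleton]
  | cons y ys =>
      simp only [PySem.Str.join, List.map_cons, PySem.Chars.join_cons_cons]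
      apply String.ext_iff.mpr
      simp

theorem pv_fold_acc (arr : List String) : ∀ (temp last : String),
    (arr.foldl pvStepA (temp, last)).1 = temp ++ (arr.foldl pvStepA ("", last)).1 := by
  induction arr with
  | nil => intro temp last; simp
  | cons w rest ih =>
      intro temp last
      simp only [List.foldl_cons, pvStepA]
      by_cases h : (w != last && w != "-") = true
      · simp only [h, if_pos]
        rw [ih (temp ++ w) w, ih ("" ++ w) w, String.append_assoc]
        simp
      · simp only [h]
        rw [if_neg (by simpa using h), if_neg (by simpa using h), ih temp w]

theorem pv_g_cons (w : String) (rest : List String) (last : String) :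
    pvG (w :: rest) last = (if (w != last && w != "-") = true then w else "") ++ pvG rest w := by
  simp only [pvG, List.foldl_cons, pvStepA]
  by_cases h : (w != last && w != "-") = true
  · simp only [h, if_pos]
    rw [pv_fold_acc rest ("" ++ w) w]
    simp
  · rw [if_neg h, if_neg h]
    simp

theorem pv_g_dropWhile (arr : List String) : ∀ last : String,
    pvG (arr.dropWhile (· == last)) last = pvG arr last := by
  induction arr with
  | nil => intro last; simp
  | cons w rest ih =>
      intro last
      by_cases h : w = last
      · subst h
        rw [List.dropWhile_cons_of_pos (by simp), ih w, pv_g_cons]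
        simp
      · rw [List.dropWhile_cons_of_neg (by simpa using h)]

theorem pv_head_dropWhile (w : String) (l : List String) :
    (l.dropWhile (· == w)).head? ≠ some w := by
  induction l with
  | nil => simp
  | cons y ys ih =>
      by_cases h : y = w
      · rw [List.dropWhile_cons_of_pos (by simp [h])]; exact ih
      · rw [List.dropWhile_cons_of_neg (by simpa using h)]
        simp only [List.head?_cons, ne_eq, Option.some.injEq]
        exact fun hc => h hc

theorem pv_main : ∀ (n : Nat) (arr : List String), arr.length ≤ n →
    ∀ last : String, (last = "-" ∨ arr.head? ≠ some last) →
    PySem.Str.join "" (pvRuns arr) = pvG arr last := by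
  intro n
  induction n with
  | zero =>
      intro arr hlen last _
      have : arr = [] := List.eq_nil_of_length_eq_zero (Nat.le_zero.mp hlen)
      subst this
      simp [pvRuns, pvG, PySem.Str.join, PySem.Chars.join_nil]
  | succ n ih =>
      intro arr hlen last hcond
      cases arr with
      | nil => simp [pvRuns, pvG, PySem.Str.join, PySem.Chars.join_nil]
      | cons w rest =>
          have hr' : (rest.dropWhile (· == w)).length ≤ n := by
            have := List.length_dropWhile_le (· == w) rest
            simp only [List.length_cons] at hlen
            omega
          by_cases hw : w = "-"
          · subst hw
            rw [show pvRuns ("-" :: rest) = pvRuns (rest.dropWhile (· == "-")) by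
                  simp [pvRuns]]
            rw [ih _ hr' "-" (Or.inl rfl), pv_g_dropWhile, pv_g_cons]
            simp
          · have hwl : w ≠ last := by
              rcases hcond with h | h
              · subst h; exact hw
              · intro he; exact h (by simp [he])
            rw [show pvRuns (w :: rest) = w :: pvRuns (rest.dropWhile (· == w)) by
                  simp [pvRuns, hw]]
            rw [pv_join_cons, ih _ hr' w (Or.inr (pv_head_dropWhile w rest)),
                pv_g_dropWhile, pv_g_cons]
            simp [hwl, hw]

-- ===== VERDICT (by name: the statement is the Claim_ definition above) =====
theorem arr_to_string_spec : Claim_equal_arr_to_string := by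
  intro arr _
  show arr_to_string arr = arr_to_string_alt arr
  unfold arr_to_string arr_to_string_alt
  exact (pv_main arr.length arr le_rfl "-" (Or.inl rfl)).symm
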